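/-
  THE SEGMENTS OF `digest_map` (gif_driver.c:113-128; 67 instructions at 105480H; NO protected frame: five pushes; contract:
  Gif/Spec/Driver.lean `digest_map.spec`; design/units/digest_map.tsv).

      unit  from      to (exits)               what it walks
      1     105480H   105553H | 105558H        the five pushes, `rbx = h`; `map == NULL` (l.115): `digest_int(h, −1)` (l.116), to the exit;
                                               otherwise `r13 = map`, the checked loads of `ColorCount` (kept in `r14d` for the whole
                                               loop), `BitsPerPixel`, `SortFlag`, each with its `digest_int` (l.118-120); `r12d = i = 0`;
                                               to the loop head                                                          (34 instructions)
      2     105553H   105553H | 105558H        ONE ROUND of the colour loop (l.121-125): the test `i < ColorCount` (`cmp r14d, r12d ; jg`);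
                                               false: to the exit; the checked 8-byte load of `map->Colors` (RE-LOADED every round), the
                                               three checked byte loads at `Colors + 3·i + 0, 1, 2`, each with its `digest_byte`; `i++`;
                                               back to the head with a smaller measure                                  (26 instructions)
      E     105558H   ret                      the shared exit: `rax = rbp`, five pops, `ret`                            (7 instructions)
      COMPOSITION                              `compose`, proved below: the loop by strong induction on the measure `ColorCount − i`

  THE MEMORY DOES NOT CHANGE outside the function's 64 bytes of stack: the heap, the forest's piece `m`, the shadow are the entry's.
  The digest value (`rbx`, `rbp`) is never constrained: no access depends on it.
-/
import Gif.Spec.Driver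
import Gif.LabelsAt
namespace Gif.Spec
open X86 X86.User Asan ProgX.Base ProgX.Base.Spec

namespace digest_map

/-- **INSIDE `digest_map`**, at the address `cut`, inside the call that was entered at the state `e` (return address `ret`) with the
function's precondition. Five registers saved (`r14 r13 r12 rbp rbx` in push order), `rsp = RA − 40`, `r15` never touched; no
protected frame: the active frames are the entry's; the heap's invariant holds for the entry's heap with the clean stack ending at the
present stack pointer; no shadow byte was written; nothing was written but the function's 64 bytes of stack. What `rbx rbp r12 r13
r14` hold is said by the assertion of each cut. -/
structure At (cut : Word) (H : Heap) (rest : List Obj) (frames : List (Nat × FrameLayout)) (m : Option Map) (u₀ e : State)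
    (ret : Word) (v : State) : Prop where
  /-- the function was entered at `e` … -/
  entry : AtEntry (conv u₀) Gif.L.digest_map.entry (digest_map.spec H rest frames m).frame ret e
  /-- … with its precondition: `HeapPre H rest frames e`, `MapAt m rsi e.mem`, `Owns H (Map.objs m)` -/
  pre : (digest_map.spec H rest frames m).pre e
  rip : v.rip = cut
  /-- five pushes below the return address -/
  rsp : v.reg .rsp = e.reg .rsp - 40
  /-- not used by the function -/
  r15 : v.reg .r15 = e.reg .r15
  /-- the saved registers, in push order: the five pops at 10555BH … 105561H (segment E) read them -/
  slot_r14 : v.mem.readLE (e.reg .rsp - 8) 8 = (e.reg .r14).toNat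
  slot_r13 : v.mem.readLE (e.reg .rsp - 16) 8 = (e.reg .r13).toNat
  slot_r12 : v.mem.readLE (e.reg .rsp - 24) 8 = (e.reg .r12).toNat
  slot_rbp : v.mem.readLE (e.reg .rsp - 32) 8 = (e.reg .rbp).toNat
  slot_rbx : v.mem.readLE (e.reg .rsp - 40) 8 = (e.reg .rbx).toNat
  /-- the return address is still in its slot: the `ret` at 105563H (segment E) pops it -/
  slot_ra : UInt64.ofNat (v.mem.readLE (e.reg .rsp) 8) = ret
  /-- the heap's invariant for the entry's heap and frames, the clean stack ending at the present stack pointer -/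
  inv : HeapInv H rest frames ((e.reg .rsp).toNat - 40) v.mem
  /-- no shadow byte was written (the contract's post) -/
  un : ShadowUntouched e.mem v.mem
  /-- nothing was written but the function's stack (the contract's 64 bytes) -/
  same : Mem.SameExcept
    [⟨(e.reg .rsp).toNat - 64, (e.reg .rsp).toNat⟩] e.mem v.mem
  code : (conv u₀).code.In v.mem
  abi : (conv u₀).inv v

/-- **THE HEAD OF THE COLOUR LOOP** (l.121, at 105553H `cmp r14d, r12d`), THE LOOP INVARIANT with the measure `k`: the pointer is not
NULL: `m = some mp`; `r13 = map = mp.obj`; the map's fields agree IN THE PRESENT MEMORY (`MapAt`: `Colors = mp.colors` is re-loaded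
every round; `1 ≤ count ≤ 256`); `r14 = ColorCount = mp.count` (loaded once at 10549BH, zero-extended), `r12 = i ≤ mp.count` (a
zero-extended 32-bit counter), `mp.count − i = k`. `rbp = h`: any value. `rbx` is dead (set inside the round). The two objects of the
map are owned: `pre` (`Owns H (Map.objs m)`). -/
structure Head (k : Nat) (H : Heap) (rest : List Obj) (frames : List (Nat × FrameLayout)) (m : Option Map) (u₀ e : State)
    (ret : Word) (v : State) : Prop where
  at_ : At Gif.L.digest_map.at_105553 H rest frames m u₀ e ret v
  /-- the map, its fields in the present memory, the count, the counter, the measure -/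
  loop : ∃ mp : Map, m = some mp ∧ (v.reg .r13).toNat = mp.obj ∧ MapAt (some mp) mp.obj v.mem ∧
    (v.reg .r14).toNat = mp.count ∧ (v.reg .r12).toNat ≤ mp.count ∧ mp.count - (v.reg .r12).toNat = k

/-- **AT THE SHARED EXIT** (at 105558H `mov rax, rbp`): `At`; the result is in `rbp` (any value: the post says nothing of it). -/
structure Done (H : Heap) (rest : List Obj) (frames : List (Nat × FrameLayout)) (m : Option Map) (u₀ e : State)
    (ret : Word) (v : State) : Prop where
  at_ : At Gif.L.digest_map.at_105558 H rest frames m u₀ e ret v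

/-- **Segment 1** (34 instructions; 105480H … 1054F5H): the five pushes, `mov rbx, rdi`; `test rsi, rsi`. NULL (`m = none` by `MapAt`, or
walked as it is): `digest_int(h, −1)` (1054E6H), `rbp = rax`, to the exit. Otherwise `m = some mp` (`MapAt none` says the pointer is
0), `r13 = map`: the checked 4-byte load of `ColorCount` (`map + 0`; `LiveIn` from `Owns H (Map.objs m)`: the object `(mp.obj, 24)`),
`r14d` = it, `digest_int`; the checked 4-byte load of `BitsPerPixel` (`map + 4`), `digest_int`; the checked byte load of `SortFlag`
(`map + 8`), `digest_int`; `rbp = h`, `r12d = 0`, to the head with the measure `mp.count`. `digest_int` writes 16 bytes of stack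
below the function's own 40 + 8: inside the contract's 64; the map object is a heap object, off the stack: `MapAt.frame`. -/
def Seg1 (Lay : Layout) (μ : Microarch) (u₀ : State) : Prop :=
  ∀ (H : Heap) (rest : List Obj) (frames : List (Nat × FrameLayout)) (m : Option Map) (e : State) (ret : Word),
    AtEntry (conv u₀) Gif.L.digest_map.entry (digest_map.spec H rest frames m).frame ret e →
    (digest_map.spec H rest frames m).pre e →
    ReachVia Lay μ WayInv e (fun w =>
      (∃ k : Nat, Head k H rest frames m u₀ e ret w) ∨
      Done H rest frames m u₀ e ret w)

/-- **Segment 2** (26 instructions; 105553H … 105558H, 1054F5H … 105553H): ONE ROUND. `cmp r14d, r12d ; jg` (signed: both are at most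
256): `i ≥ count`: to the exit. Otherwise `i < mp.count`: the checked 8-byte load of `map->Colors` (`map + 16`), `rbx = Colors + 3·i`
(`movsxd ; lea [rax+rax*2] ; add`); the checked byte loads at `rbx`, `rbx + 1`, `rbx + 2` — inside the live object
`(mp.colors, 3 · mp.count)`: `3·i + 2 < 3 · mp.count` —, each followed by `digest_byte` (a leaf: `v.mem = u.mem`); `add r12d, 1`; back
to the head with the measure `k − 1`. -/
def Seg2 (Lay : Layout) (μ : Microarch) (u₀ : State) : Prop :=
  ∀ (H : Heap) (rest : List Obj) (frames : List (Nat × FrameLayout)) (m : Option Map) (e : State) (ret : Word) (k : Nat)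
    (v : State),
    Head k H rest frames m u₀ e ret v →
    ReachVia Lay μ WayInv v (fun w =>
      (∃ k' : Nat, k' < k ∧ Head k' H rest frames m u₀ e ret w) ∨
      Done H rest frames m u₀ e ret w)

/-- **Segment E** (the shared exit, 7 instructions; 105558H … 105564H): `mov rax, rbp`, five pops, `ret`: the contract's `Returned`
(`post` = `ShadowUntouched`: `At.un`; `same`: `At.same`, the contract's footprint is the 64 bytes of stack). -/
def SegE (Lay : Layout) (μ : Microarch) (u₀ : State) : Prop :=
  ∀ (H : Heap) (rest : List Obj) (frames : List (Nat × FrameLayout)) (m : Option Map) (e : State) (ret : Word) (v : State),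
    Done H rest frames m u₀ e ret v →
    ReachVia Lay μ WayInv v (Returned (conv u₀) (digest_map.spec H rest frames m) e ret)

/-- **THE COLOUR LOOP**, from its head with the measure `k`: by strong induction on `k`. A round is segment 2 (to the exit, or back to
the head with a smaller measure). -/
theorem fromHead {Lay : Layout} {μ : Microarch} {u₀ : State} (h2 : Seg2 Lay μ u₀) (hE : SegE Lay μ u₀)
    (H : Heap) (rest : List Obj) (frames : List (Nat × FrameLayout)) (m : Option Map) (e : State) (ret : Word) :
    ∀ (k : Nat) (v : State),
      Head k H rest frames m u₀ e ret v →
      ReachVia Lay μ WayInv v (Returned (conv u₀) (digest_map.spec H rest frames m) e ret) := by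
  intro k
  induction k using Nat.strongRecOn with
  | _ k ih =>
    intro v hv
    refine (h2 H rest frames m e ret k v hv).trans ?_
    intro w hw
    rcases hw with hh | hd
    · obtain ⟨k', hlt, hh'⟩ := hh
      exact ih k' hlt w hh'
    · exact hE H rest frames m e ret w hd

/-- **The composition of `digest_map`**: the three segments chain into the function's contract. -/
theorem compose {Lay : Layout} {μ : Microarch} {u₀ : State} (h1 : Seg1 Lay μ u₀) (h2 : Seg2 Lay μ u₀) (hE : SegE Lay μ u₀) :
    ∀ (H : Heap) (rest : List Obj) (frames : List (Nat × FrameLayout)) (m : Option Map),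
      Calls Lay μ WayInv (conv u₀) Gif.L.digest_map.entry (digest_map.spec H rest frames m) := by
  intro H rest frames m e ret he hp
  refine (h1 H rest frames m e ret he hp).trans ?_
  intro v hv
  rcases hv with hh | hd
  · obtain ⟨k, hk⟩ := hh
    exact fromHead h2 hE H rest frames m e ret k v hk
  · exact hE H rest frames m e ret v hd

end digest_map

end Gif.Spec
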